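-- pv_equiv track=rewrite | github.com/chaitanya985/geeks-for-geeks-solved-problems | Difficulty: Basic/Height of Heap/height-of-heap.py | heapHeight
-- ===== SOURCE A (Python) =====
-- def heapHeight(N, arr):
--     # code here
--
--     if N==1:
--
--         return 1
--
--     N-=1
--
--     count=0
--
--     while N > 0:
--
--         count+=1
--
--         N=(N-1)//2
--
--     return count
-- ===== SOURCE B (Python) =====
-- def heapHeight(N, arr):
--     # closed form: height = floor(log2 N) for N >= 2; A's edge values kept
--     if N <= 0:
--         return 0
--     if N == 1:
--         return 1
--     return N.bit_length() - 1
-- ===== Notes on version B (the rewrite author's own statement) =====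
-- stated objective: simpler
-- what changed: Replaces the parent-chasing while loop with the closed form floor(log2 N) via int.bit_length, keeping A's values 1 at N==1 and 0 for N<=0.
import Mathlib
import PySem

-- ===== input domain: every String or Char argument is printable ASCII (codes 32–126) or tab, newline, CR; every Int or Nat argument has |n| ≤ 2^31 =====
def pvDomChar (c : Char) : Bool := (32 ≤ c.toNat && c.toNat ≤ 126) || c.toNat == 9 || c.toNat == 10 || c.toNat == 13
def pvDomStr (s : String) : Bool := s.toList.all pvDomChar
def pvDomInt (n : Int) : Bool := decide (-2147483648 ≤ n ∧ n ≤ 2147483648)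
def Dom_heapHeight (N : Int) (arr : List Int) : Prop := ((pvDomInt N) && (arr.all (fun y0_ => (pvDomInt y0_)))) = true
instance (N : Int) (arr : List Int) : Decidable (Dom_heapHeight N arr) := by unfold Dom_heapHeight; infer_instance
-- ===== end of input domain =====

-- B replaces A's parent-chasing while loop with the closed form via int.bit_length (simpler; same edge values).


-- ===== PORT A =====
-- termination helper for the while loop: (x-1)//2 strictly shrinks x.toNat when x > 0
theorem pvHeapLoop_dec (x : Int) (h : x > 0) :
    (PySem.Int.floordiv (x - 1) 2).toNat < x.toNat := by
  rw [PySem.Int.floordiv_eq_ediv_of_pos (by omega)]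
  omega

-- the while loop of A: while N > 0: count += 1; N = (N-1)//2
def heapLoop (x : Int) (count : Int) : Int :=
  if h : x > 0 then heapLoop (PySem.Int.floordiv (x - 1) 2) (count + 1) else count
termination_by x.toNat
decreasing_by exact pvHeapLoop_dec x h

def heapHeight (N : Int) (arr : List Int) : Int :=
  if N == 1 then 1
  else heapLoop (N - 1) 0

-- ===== PORT B =====
def heapHeight_alt (N : Int) (arr : List Int) : Int :=
  if N ≤ 0 then 0
  else if N == 1 then 1
  else (PySem.Int.bitLength N : Int) - 1

-- ===== PRECONDITION & SPEC =====
def Spec_heapHeight (N : Int) (arr : List Int) (out : Int) : Prop := out = heapHeight_alt N arr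
instance (N : Int) (arr : List Int) (out : Int) : Decidable (Spec_heapHeight N arr out) := by unfold Spec_heapHeight; infer_instance

-- ===== CLAIM (what is proved, stated in full; the proofs are below) =====
def Claim_equal_heapHeight : Prop := ∀ (N : Int) (arr : List Int), Dom_heapHeight N arr → Spec_heapHeight N arr (heapHeight N arr)

-- ===== LEMMAS AND PROOFS =====

-- A's loop started at a natural number m counts bit_length(m+1) - 1 steps
theorem heapLoop_eq_bitLength (m : Nat) :
    ∀ c : Int, heapLoop (m : Int) c = c + (PySem.Int.bitLength ((m : Int) + 1) : Int) - 1 := by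
  induction m using Nat.strong_induction_on with
  | _ m ih =>
    intro c
    rw [heapLoop]
    by_cases hm : (m : Int) > 0
    · have hm1 : 1 ≤ m := by exact_mod_cast hm
      have hfd : PySem.Int.floordiv ((m : Int) - 1) 2 = (((m - 1) / 2 : Nat) : Int) := by
        rw [PySem.Int.floordiv_eq_ediv_of_pos (by omega)]
        omega
      rw [dif_pos hm, hfd, ih ((m - 1) / 2) (by omega) (c + 1)]
      have hdiv : ((m - 1) / 2 : Nat) + 1 = ((m + 1) / 2 : Nat) := by omega
      have hbl : PySem.Int.bitLength ((m : Int) + 1) =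
          PySem.Int.bitLength ((((m + 1) / 2 : Nat) : Int)) + 1 := by
        have := PySem.Int.bitLength_natCast (show 0 < m + 1 by omega)
        push_cast at this ⊢
        omega
      have hcast : ((m : Int) - 1) = (((m - 1 : Nat)) : Int) := by omega
      rw [show (((m - 1) / 2 : Nat) : Int) + 1 = ((((m - 1) / 2 : Nat) + 1 : Nat) : Int) by push_cast; ring,
          hdiv, hbl]
      push_cast
      ring
    · have : m = 0 := by omega
      subst this
      rw [dif_neg hm]
      have h1 : PySem.Int.bitLength (((0:Nat):Int) + 1) = 1 := by decide
      rw [h1]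
      push_cast
      ring
  
theorem heapHeight_spec : Claim_equal_heapHeight := by
  intro N arr _
  unfold Spec_heapHeight heapHeight heapHeight_alt
  by_cases h1 : N = 1
  · simp [h1]
  · rw [if_neg (by simpa using h1)]
    by_cases hle : N ≤ 0
    · rw [if_pos hle, heapLoop, dif_neg (by omega : ¬ (N - 1 > 0))]
    · rw [if_neg hle, if_neg (by simpa using h1)]
      have hN2 : 2 ≤ N := by omega
      have hcast : N - 1 = ((N.toNat - 1 : Nat) : Int) := by omega
      rw [hcast, heapLoop_eq_bitLength (N.toNat - 1) 0]
      have : ((N.toNat - 1 : Nat) : Int) + 1 = N := by omega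
      rw [this]
      ring
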